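-- pv_equiv track=rewrite | github.com/srgnk/HackerRank | algorithms/equal.py | equalize
-- ===== SOURCE A (Python) =====
-- def equalize(arr):
--     res = 0
--     for el in arr:
--         while el != 0:
--             if el == 1 or el == 2 or el == 5:
--                 el -= el
--                 res += 1
--             elif el == 3 or el == 4:
--                 el -= el
--                 res += 2
--             else:
--                 res += el//5
--                 el = int(el%5)
--     return res
-- ===== SOURCE B (Python) =====
-- def equalize(arr):
--     return sum(el//5 + (el % 5 + 1)//2 for el in arr)
-- ===== Notes on version B (the rewrite author's own statement) =====
-- stated objective: simpler
-- what changed: Replaces the per-element while-loop with branch cascade by a one-line closed-form sum: each element contributes el//5 + (el%5+1)//2.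
import Mathlib
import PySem

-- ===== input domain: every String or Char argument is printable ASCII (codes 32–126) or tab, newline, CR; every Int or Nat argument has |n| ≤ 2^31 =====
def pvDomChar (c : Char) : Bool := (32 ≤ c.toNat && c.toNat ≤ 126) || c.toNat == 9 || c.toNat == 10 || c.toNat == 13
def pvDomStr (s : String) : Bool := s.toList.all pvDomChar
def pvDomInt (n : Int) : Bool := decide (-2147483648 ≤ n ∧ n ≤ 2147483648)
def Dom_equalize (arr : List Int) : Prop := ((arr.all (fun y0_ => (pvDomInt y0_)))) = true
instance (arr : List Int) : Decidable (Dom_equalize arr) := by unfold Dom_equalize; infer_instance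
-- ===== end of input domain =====

-- B replaces A's per-element while-loop (branch cascade) by a closed-form one-pass contribution el//5 + (el%5+1)//2 (simpler).


-- ===== PORT A =====
-- termination measure for A's while loop: 0 at el=0, 1 on 1..5, else 2
def equalizeMeasure (el : Int) : Nat :=
  if el = 0 then 0 else if 1 ≤ el ∧ el ≤ 5 then 1 else 2

-- the inner 'while el != 0' loop of A, carrying (el, res)
def equalizeLoop (el res : Int) : Int :=
  if el = 0 then res
  else if el = 1 ∨ el = 2 ∨ el = 5 then equalizeLoop (el - el) (res + 1)
  else if el = 3 ∨ el = 4 then equalizeLoop (el - el) (res + 2)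
  else equalizeLoop (PySem.Int.mod el 5) (res + PySem.Int.floordiv el 5)
termination_by equalizeMeasure el
decreasing_by
  · simp only [equalizeMeasure]; split_ifs <;> omega
  · simp only [equalizeMeasure]; split_ifs <;> omega
  · have h1 : 0 ≤ PySem.Int.mod el 5 := by
      rw [PySem.Int.mod_eq_emod_of_pos (by norm_num)]; exact Int.emod_nonneg _ (by norm_num)
    have h2 : PySem.Int.mod el 5 < 5 := by
      rw [PySem.Int.mod_eq_emod_of_pos (by norm_num)]; exact Int.emod_lt_of_pos _ (by norm_num)
    simp only [equalizeMeasure]; split_ifs <;> omega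

def equalize (arr : List Int) : Int :=
  arr.foldl (fun res el => equalizeLoop el res) 0

-- ===== PORT B =====
def equalize_alt (arr : List Int) : Int :=
  (arr.map (fun el => PySem.Int.floordiv el 5 + PySem.Int.floordiv (PySem.Int.mod el 5 + 1) 2)).sum

-- ===== PRECONDITION & SPEC =====
def Spec_equalize (arr : List Int) (out : Int) : Prop := out = equalize_alt arr
instance (arr : List Int) (out : Int) : Decidable (Spec_equalize arr out) := by unfold Spec_equalize; infer_instance

-- ===== CLAIM (what is proved, stated in full; the proofs are below) =====
def Claim_equal_equalize : Prop := ∀ (arr : List Int), Dom_equalize arr → Spec_equalize arr (equalize arr)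

-- ===== LEMMAS AND PROOFS =====
theorem loop0 (res : Int) : equalizeLoop 0 res = res := by rw [equalizeLoop]; norm_num
theorem loop1 (res : Int) : equalizeLoop 1 res = res + 1 := by
  rw [equalizeLoop]; norm_num; rw [equalizeLoop]; norm_num
theorem loop2 (res : Int) : equalizeLoop 2 res = res + 1 := by
  rw [equalizeLoop]; norm_num; rw [equalizeLoop]; norm_num
theorem loop3 (res : Int) : equalizeLoop 3 res = res + 2 := by
  rw [equalizeLoop]; norm_num; rw [equalizeLoop]; norm_num
theorem loop4 (res : Int) : equalizeLoop 4 res = res + 2 := by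
  rw [equalizeLoop]; norm_num; rw [equalizeLoop]; norm_num
theorem loop_small (r res : Int) (h0 : 0 ≤ r) (h5 : r < 5) :
    equalizeLoop r res = res + PySem.Int.floordiv (r + 1) 2 := by
  interval_cases r
  · rw [loop0]; norm_num [show PySem.Int.floordiv 1 2 = 0 from by decide]
  · rw [loop1]; norm_num [show PySem.Int.floordiv 2 2 = 1 from by decide]
  · rw [loop2]; norm_num [show PySem.Int.floordiv 3 2 = 1 from by decide]
  · rw [loop3]; norm_num [show PySem.Int.floordiv 4 2 = 2 from by decide]
  · rw [loop4]; norm_num [show PySem.Int.floordiv 5 2 = 2 from by decide]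

theorem loop_closed (el res : Int) :
    equalizeLoop el res =
      res + (PySem.Int.floordiv el 5 + PySem.Int.floordiv (PySem.Int.mod el 5 + 1) 2) := by
  by_cases hs : 0 ≤ el ∧ el ≤ 5
  · have h1 : el = 0 ∨ el = 1 ∨ el = 2 ∨ el = 3 ∨ el = 4 ∨ el = 5 := by omega
    rcases h1 with h | h | h | h | h | h <;> subst h
    · rw [loop0]; norm_num [show PySem.Int.floordiv 0 5 = 0 from by decide,
        show PySem.Int.mod 0 5 = 0 from by decide, show PySem.Int.floordiv 1 2 = 0 from by decide]
    · rw [loop1]; norm_num [show PySem.Int.floordiv 1 5 = 0 from by decide,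
        show PySem.Int.mod 1 5 = 1 from by decide, show PySem.Int.floordiv 2 2 = 1 from by decide]
    · rw [loop2]; norm_num [show PySem.Int.floordiv 2 5 = 0 from by decide,
        show PySem.Int.mod 2 5 = 2 from by decide, show PySem.Int.floordiv 3 2 = 1 from by decide]
    · rw [loop3]; norm_num [show PySem.Int.floordiv 3 5 = 0 from by decide,
        show PySem.Int.mod 3 5 = 3 from by decide, show PySem.Int.floordiv 4 2 = 2 from by decide]
    · rw [loop4]; norm_num [show PySem.Int.floordiv 4 5 = 0 from by decide,
        show PySem.Int.mod 4 5 = 4 from by decide, show PySem.Int.floordiv 5 2 = 2 from by decide]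
    · rw [equalizeLoop]; norm_num; rw [loop0]
  · -- else branch of A: el < 0 or el > 5
    have hm0 : 0 ≤ PySem.Int.mod el 5 := by
      rw [PySem.Int.mod_eq_emod_of_pos (by norm_num)]; exact Int.emod_nonneg _ (by norm_num)
    have hm5 : PySem.Int.mod el 5 < 5 := by
      rw [PySem.Int.mod_eq_emod_of_pos (by norm_num)]; exact Int.emod_lt_of_pos _ (by norm_num)
    rw [equalizeLoop, if_neg (by omega), if_neg (by omega), if_neg (by omega),
      loop_small _ _ hm0 hm5]
    ring

theorem foldl_loop (arr : List Int) (res : Int) :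
    arr.foldl (fun res el => equalizeLoop el res) res
      = res + (arr.map (fun el => PySem.Int.floordiv el 5 + PySem.Int.floordiv (PySem.Int.mod el 5 + 1) 2)).sum := by
  induction arr generalizing res with
  | nil => simp
  | cons x xs ih =>
    simp only [List.foldl_cons, List.map_cons, List.sum_cons]
    rw [ih, loop_closed]; ring

-- ===== VERDICT (by name: the statement is the Claim_ definition above) =====
theorem equalize_spec : Claim_equal_equalize := by
  intro arr _
  unfold Spec_equalize equalize equalize_alt
  rw [foldl_loop]; ring
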